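-- pv_equiv track=rewrite | github.com/isayaksh/Algorithm | BaekJoon/5883.py | solution
-- ===== SOURCE A (Python) =====
-- def solution(N, battery):
--     def longestLength(newLine):
--         lengthList = []
--         for i in range(1, len(newLine)):
--             if newLine[i-1] != newLine[i]:
--                 lengthList.append(1)
--             else:
--                 lengthList[-1] += 1
--         return max(lengthList)
--
--     answer = 0
--
--     battery_set = set(battery)
--     for ex in battery_set:
--         newLine = [-100] + [b for b in battery if b != ex]
--         length = longestLength(newLine)
--         answer = max(answer, length)
--
--     return answer
-- ===== SOURCE B (Python) =====
-- def solution(N, battery):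
--     # run-length encode once, then for each removed value scan the runs,
--     # merging adjacent runs across removed runs; O(1) extra state per scan
--     runs = []
--     for b in battery:
--         if runs and runs[-1][0] == b:
--             runs[-1] = (b, runs[-1][1] + 1)
--         else:
--             runs.append((b, 1))
--     best = 0
--     for ex in set(battery):
--         cur_val = None
--         cur_len = 0
--         m = 0
--         for v, k in runs:
--             if v == ex:
--                 continue
--             cur_len = cur_len + k if v == cur_val else k
--             cur_val = v
--             if cur_len > m:
--                 m = cur_len
--         best = max(best, m)
--     return best
-- ===== Notes on version B (the rewrite author's own statement) =====
-- stated objective: alternative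
-- what changed: B run-length-encodes the list once and, per removed value, does a single O(1)-state merge scan over the runs, instead of A's per-value construction of a sentinel-prefixed filtered copy plus a run-length list that is then maxed.
import Mathlib
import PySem

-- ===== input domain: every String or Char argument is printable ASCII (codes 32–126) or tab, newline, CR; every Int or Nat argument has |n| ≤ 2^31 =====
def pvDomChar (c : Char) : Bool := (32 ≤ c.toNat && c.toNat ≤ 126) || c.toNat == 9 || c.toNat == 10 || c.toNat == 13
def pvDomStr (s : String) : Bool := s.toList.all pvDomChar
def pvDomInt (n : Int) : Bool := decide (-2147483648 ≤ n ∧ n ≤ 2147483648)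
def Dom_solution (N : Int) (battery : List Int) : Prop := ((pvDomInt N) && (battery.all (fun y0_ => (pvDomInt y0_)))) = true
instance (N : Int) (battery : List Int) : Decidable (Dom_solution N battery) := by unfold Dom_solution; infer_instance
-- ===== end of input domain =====

-- B replaces A's per-value sentinel-prefixed copy + run-length list + max by one run-length
-- encoding pass and a per-value O(1)-state merge scan over the runs (objective: alternative).

-- ===== PORT A =====
-- inner helper longestLength:  lengthList[-1] += 1 on an empty lengthList is an IndexError and
-- max([]) a ValueError in Python; there the total pySetD / .getD 0 below return junk — both
-- situations are excluded by Pre_solution.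
def pvLongestLength (newLine : List Int) : Int :=
  let lengthList : List Int :=
    (PySem.List.pyRange 1 (PySem.List.len newLine) 1).foldl
      (fun lengthList i =>
        if PySem.List.pyGetD newLine (i - 1) 0 ≠ PySem.List.pyGetD newLine i 0 then
          lengthList ++ [1]
        else
          PySem.List.pySetD lengthList (-1) (PySem.List.pyGetD lengthList (-1) 0 + 1)) []
  (PySem.List.max? lengthList (fun x => x)).getD 0

def solution (N : Int) (battery : List Int) : Int :=
  let battery_set := PySem.Set.ofList battery
  battery_set.foldl
    (fun answer ex =>
      let newLine := -100 :: battery.filter (fun b => b ≠ ex)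
      let length := pvLongestLength newLine
      max answer length) 0

-- ===== PORT B =====
-- loop body of Source B's run-length-encoding pass
def pvRLEStep (runs : List (Int × Int)) (b : Int) : List (Int × Int) :=
  match runs.getLast? with
  | some (v, k) => if v = b then runs.dropLast ++ [(b, k + 1)] else runs ++ [(b, 1)]
  | none => runs ++ [(b, 1)]

def pvRLE (battery : List Int) : List (Int × Int) :=
  battery.foldl pvRLEStep []

-- loop body of Source B's per-removed-value merge scan; state (cur_val, cur_len, m)
def pvBStep (ex : Int) (st : Option Int × Int × Int) (vk : Int × Int) : Option Int × Int × Int :=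
  if vk.1 = ex then st
  else
    let curLen := if some vk.1 = st.1 then st.2.1 + vk.2 else vk.2
    (some vk.1, curLen, if curLen > st.2.2 then curLen else st.2.2)

def pvMergedMax (runs : List (Int × Int)) (ex : Int) : Int :=
  let st := runs.foldl (pvBStep ex) (none, 0, 0)
  st.2.2

def solution_alt (N : Int) (battery : List Int) : Int :=
  let runs := pvRLE battery
  (PySem.Set.ofList battery).foldl (fun best ex => max best (pvMergedMax runs ex)) 0

-- ===== PRECONDITION & SPEC =====
-- Pre_ excludes exactly the inputs where the Python A raises: a non-empty battery with a single
-- distinct value (max([]) → ValueError), and a battery where removing some distinct value leaves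
-- a line starting with the sentinel -100 (lengthList[-1] += 1 on empty → IndexError).
def Pre_solution (N : Int) (battery : List Int) : Prop :=
  battery = [] ∨
    (2 ≤ (PySem.Set.ofList battery).length ∧
      ∀ ex ∈ PySem.Set.ofList battery,
        (battery.filter (fun b => b ≠ ex)).head? ≠ some (-100))
instance (N : Int) (battery : List Int) : Decidable (Pre_solution N battery) := by
  unfold Pre_solution; infer_instance
def pvWitness_solution : Int × List Int := (5, [1, 1, 2, 1, 2])

def Spec_solution (N : Int) (battery : List Int) (out : Int) : Prop := out = solution_alt N battery
instance (N : Int) (battery : List Int) (out : Int) : Decidable (Spec_solution N battery out) := by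
  unfold Spec_solution; infer_instance

-- ===== CLAIM (what is proved, stated in full; the proofs are below) =====
def Claim_equal_solution : Prop := ∀ (N : Int) (battery : List Int), Dom_solution N battery → Pre_solution N battery → Spec_solution N battery (solution N battery)
-- ===== LEMMAS AND PROOFS =====

-- the elementwise reference scan: state (previous value, current run length, best so far)
def pvStep (st : Option Int × Int × Int) (x : Int) : Option Int × Int × Int :=
  let c := if some x = st.1 then st.2.1 + 1 else 1
  (some x, c, if c > st.2.2 then c else st.2.2)

theorem pv_if_max (c m : Int) : (if c > m then c else m) = max m c := by
  split <;> omega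

-- structural form of A's inner loop (same branch bodies as the port's fold)
def pvAScan (prev : Int) : List Int → List Int → List Int
  | [], acc => acc
  | x :: xs, acc =>
      if prev ≠ x then pvAScan x xs (acc ++ [1])
      else pvAScan x xs (PySem.List.pySetD acc (-1) (PySem.List.pyGetD acc (-1) 0 + 1))

-- Python max of the length list, as the port computes it
def pvMaxL (l : List Int) : Int := (PySem.List.max? l (fun x => x)).getD 0

theorem pvAScan_bridge (newLine : List Int) :
    ∀ (n k : Nat) (acc : List Int), newLine.length - k = n → 1 ≤ k → k ≤ newLine.length →
      (PySem.List.pyRange (k : Int) (PySem.List.len newLine) 1).foldl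
        (fun lengthList i =>
          if PySem.List.pyGetD newLine (i - 1) 0 ≠ PySem.List.pyGetD newLine i 0 then
            lengthList ++ [1]
          else
            PySem.List.pySetD lengthList (-1) (PySem.List.pyGetD lengthList (-1) 0 + 1)) acc
      = pvAScan (newLine.getD (k - 1) 0) (newLine.drop k) acc := by
  intro n
  induction n with
  | zero =>
      intro k acc hn h1 hk
      have hk' : k = newLine.length := by omega
      subst hk'
      rw [PySem.List.pyRange_one_eq_nil (by simp)]
      simp [pvAScan]
  | succ n ih =>
      intro k acc hn h1 hk
      have hklt : k < newLine.length := by omega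
      have hlt : (k : Int) < PySem.List.len newLine := by simp; omega
      rw [PySem.List.pyRange_one_cons hlt, List.foldl_cons]
      have e1 : ((k : Int) - 1) = ((k - 1 : Nat) : Int) := by omega
      have e2 : ((k : Int) + 1) = ((k + 1 : Nat) : Int) := by omega
      have hb1 : PySem.List.pyGetD newLine ((k : Int) - 1) 0 = newLine.getD (k - 1) 0 := by
        rw [e1]; simp
      have hb2 : PySem.List.pyGetD newLine (k : Int) 0 = newLine.getD k 0 := by simp
      have hdrop : newLine.drop k = newLine[k] :: newLine.drop (k + 1) :=
        List.drop_eq_getElem_cons hklt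
      have hgetk : newLine.getD k 0 = newLine[k] := List.getD_eq_getElem _ _ hklt
      rw [e2, ih (k + 1) _ (by omega) (by omega) (by omega)]
      simp only [Nat.add_sub_cancel, hdrop, hb1, hb2, hgetk]
      simp only [pvAScan]
      split <;> rfl

theorem pvMaxL_append (l : List Int) (v : Int) (h : l ≠ []) :
    pvMaxL (l ++ [v]) = max (pvMaxL l) v := by
  rcases l with _ | ⟨a, t⟩
  · exact absurd rfl h
  · simp [pvMaxL, PySem.List.max?_id_cons, List.foldl_append]

theorem pvMaxL_setLast (ys : List Int) (b : Int) :
    pvMaxL (ys ++ [b + 1]) = max (pvMaxL (ys ++ [b])) (b + 1) := by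
  rcases ys with _ | ⟨a, t⟩
  · simp [pvMaxL, PySem.List.max?_id_cons]
  · rw [pvMaxL_append _ _ (by simp), pvMaxL_append _ _ (by simp)]
    omega

theorem pvInc (ys : List Int) (b v : Int) :
    PySem.List.pySetD (ys ++ [b]) (-1) v = ys ++ [v] := by
  simp [PySem.List.pySetD, PySem.List.pySet?, PySem.List.pyIdx?, List.set_append]

theorem pvAScan_spec : ∀ (rest : List Int) (prev : Int) (acc : List Int), acc ≠ [] →
    (rest.foldl pvStep (some prev, acc.getLastD 0, pvMaxL acc)).2.2
      = pvMaxL (pvAScan prev rest acc) := by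
  intro rest
  induction rest with
  | nil => intro prev acc _; simp [pvAScan]
  | cons x xs ih =>
      intro prev acc h
      rcases List.eq_nil_or_concat acc with rfl | ⟨ys, b, rfl⟩
      · exact absurd rfl h
      simp only [List.concat_eq_append] at h ⊢
      rw [List.foldl_cons]
      by_cases hpx : prev = x
      · subst hpx
        have hstep : pvStep (some prev, (ys ++ [b]).getLastD 0, pvMaxL (ys ++ [b])) prev
            = (some prev, b + 1, max (pvMaxL (ys ++ [b])) (b + 1)) := by
          simp [pvStep, Prod.ext_iff]
          split <;> omega
        rw [hstep,
          show pvAScan prev (prev :: xs) (ys ++ [b]) = pvAScan prev xs (ys ++ [b + 1]) from by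
            simp [pvAScan, pvInc]]
        have hrec := ih prev (ys ++ [b + 1]) (by simp)
        rw [List.getLastD_concat, pvMaxL_setLast] at hrec
        exact hrec
      · have hstep : pvStep (some prev, (ys ++ [b]).getLastD 0, pvMaxL (ys ++ [b])) x
            = (some x, 1, max (pvMaxL (ys ++ [b])) 1) := by
          simp [pvStep, Prod.ext_iff, show ¬ (some x = some prev) from by
            simpa using fun h' => hpx h'.symm]
          split <;> omega
        rw [hstep,
          show pvAScan prev (x :: xs) (ys ++ [b]) = pvAScan x xs ((ys ++ [b]) ++ [1]) from by
            simp [pvAScan, hpx]]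
        have hrec := ih x ((ys ++ [b]) ++ [1]) (by simp)
        rw [List.getLastD_concat, pvMaxL_append _ _ (by simp)] at hrec
        exact hrec

-- A-side characterisation
theorem pvA_char (l : List Int) (hhead : l.head? ≠ some (-100)) :
    pvLongestLength ((-100) :: l) = (l.foldl pvStep (none, 0, 0)).2.2 := by
  rcases l with _ | ⟨x, xs⟩
  · decide
  · have hx : x ≠ -100 := by simpa using hhead
    have hb := pvAScan_bridge ((-100) :: x :: xs) (x :: xs).length 1 [] (by simp) (by omega)
      (by simp)
    rw [show ((1 : Nat) : Int) = 1 from by norm_num] at hb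
    show pvMaxL ((PySem.List.pyRange 1 (PySem.List.len ((-100) :: x :: xs)) 1).foldl _ []) = _
    rw [hb]
    have hscan : pvAScan (((-100) :: x :: xs).getD 0 0) (((-100) :: x :: xs).drop 1) []
        = pvAScan x xs [1] := by
      simp [pvAScan, Ne.symm hx]
    rw [hscan, List.foldl_cons,
      show pvStep (none, 0, 0) x = (some x, 1, 1) from by simp [pvStep],
      show ((some x : Option Int), (1 : Int), (1 : Int))
        = (some x, List.getLastD [1] 0, pvMaxL [1]) from rfl]
    exact (pvAScan_spec xs x [1] (by simp)).symm

-- chunk of k equal values, elementwise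
theorem pvStep_replicate (v c m : Int) (k : Nat) (hcm : c ≤ m) :
    (List.replicate k v).foldl pvStep (some v, c, m) = (some v, c + k, max m (c + k)) := by
  induction k generalizing c m with
  | zero => simp; omega
  | succ k ih =>
      rw [List.replicate_succ, List.foldl_cons]
      have hstep : pvStep (some v, c, m) v = (some v, c + 1, max m (c + 1)) := by
        simp [pvStep]; omega
      rw [hstep, ih (c + 1) (max m (c + 1)) (le_max_right _ _)]
      simp [Prod.ext_iff]
      constructor <;> omega

-- a run of k equal values, scanned elementwise
theorem pvChunk (v c m : Int) (pv : Option Int) (k : Int) (hk : 1 ≤ k) :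
    (List.replicate k.toNat v).foldl pvStep (pv, c, m)
      = (some v, (if some v = pv then c + k else k),
          max m (if some v = pv then c + k else k)) := by
  have hkn : k.toNat = (k.toNat - 1) + 1 := by omega
  rw [hkn, List.replicate_succ, List.foldl_cons]
  by_cases hp : some v = pv
  · subst hp
    rw [show pvStep (some v, c, m) v = (some v, c + 1, max m (c + 1)) from by
      simp [pvStep, Prod.ext_iff]; split <;> omega]
    rw [pvStep_replicate v (c + 1) (max m (c + 1)) _ (le_max_right _ _)]
    simp [Prod.ext_iff]
    constructor <;> omega
  · rw [show pvStep (pv, c, m) v = (some v, 1, max m 1) from by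
      simp [pvStep, hp, Prod.ext_iff]; split <;> omega]
    rw [pvStep_replicate v 1 (max m 1) _ (le_max_right _ _)]
    simp [Prod.ext_iff, hp]
    constructor <;> omega

-- B-side: the merge scan over runs is the elementwise scan over the flattened non-ex runs
theorem pvB_scan (ex : Int) : ∀ (rs : List (Int × Int)) (st : Option Int × Int × Int),
    st.2.1 ≤ st.2.2 → (∀ p ∈ rs, 1 ≤ p.2) →
    rs.foldl (pvBStep ex) st
      = ((rs.filter (fun p => p.1 ≠ ex)).flatMap
          (fun p => List.replicate p.2.toNat p.1)).foldl pvStep st := by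
  intro rs
  induction rs with
  | nil => intro st _ _; rfl
  | cons p rs ih =>
      intro st hst hk
      obtain ⟨v, k⟩ := p
      obtain ⟨pv, c, m⟩ := st
      rw [List.foldl_cons]
      by_cases hv : v = ex
      · rw [show pvBStep ex (pv, c, m) (v, k) = (pv, c, m) from by simp [pvBStep, hv],
          show ((v, k) :: rs).filter (fun p => p.1 ≠ ex) = rs.filter (fun p => p.1 ≠ ex) from by
            simp [hv]]
        exact ih (pv, c, m) hst (fun q hq => hk q (by simp [hq]))
      · have hk1 : (1 : Int) ≤ k := hk (v, k) (by simp)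
        rw [show ((v, k) :: rs).filter (fun p => p.1 ≠ ex)
              = (v, k) :: rs.filter (fun p => p.1 ≠ ex) from by simp [hv],
          List.flatMap_cons, List.foldl_append, pvChunk v c m pv k hk1,
          show pvBStep ex (pv, c, m) (v, k)
              = (some v, (if some v = pv then c + k else k),
                  max m (if some v = pv then c + k else k)) from by
            simp [pvBStep, hv, pv_if_max]]
        exact ih _ (le_max_right _ _) (fun q hq => hk q (by simp [hq]))

theorem pvRLE_aux : ∀ (l : List Int) (rs : List (Int × Int)), (∀ p ∈ rs, 1 ≤ p.2) →
    (l.foldl pvRLEStep rs).flatMap (fun p => List.replicate p.2.toNat p.1)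
        = rs.flatMap (fun p => List.replicate p.2.toNat p.1) ++ l ∧
      ∀ p ∈ l.foldl pvRLEStep rs, 1 ≤ p.2 := by
  intro l
  induction l with
  | nil => intro rs h; exact ⟨by simp, h⟩
  | cons x l ih =>
      intro rs h
      rw [List.foldl_cons]
      rcases List.eq_nil_or_concat rs with rfl | ⟨ys, p, rfl⟩
      · rw [show pvRLEStep [] x = [(x, 1)] from rfl]
        obtain ⟨h1, h2⟩ := ih [(x, 1)] (by intro q hq; simp at hq; simp [hq])
        refine ⟨?_, h2⟩
        rw [h1]; simp
      · obtain ⟨v, k⟩ := p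
        simp only [List.concat_eq_append] at h ⊢
        have hget : (ys ++ [(v, k)]).getLast? = some (v, k) := by simp
        have hkv : (1 : Int) ≤ k := h (v, k) (by simp)
        by_cases hvx : v = x
        · rw [show pvRLEStep (ys ++ [(v, k)]) x = ys ++ [(x, k + 1)] from by
            simp [pvRLEStep, hget, hvx]]
          obtain ⟨h1, h2⟩ := ih (ys ++ [(x, k + 1)]) (by
            intro q hq
            rcases List.mem_append.mp hq with hq | hq
            · exact h q (by simp [hq])
            · simp at hq; simp [hq]; omega)
          refine ⟨?_, h2⟩
          rw [h1]
          simp only [List.flatMap_append, List.flatMap_cons, List.flatMap_nil,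
            List.append_nil]
          rw [show (k + 1).toNat = k.toNat + 1 from by omega, List.replicate_succ', hvx]
          simp
        · rw [show pvRLEStep (ys ++ [(v, k)]) x = (ys ++ [(v, k)]) ++ [(x, 1)] from by
            simp [pvRLEStep, hget, hvx]]
          obtain ⟨h1, h2⟩ := ih ((ys ++ [(v, k)]) ++ [(x, 1)]) (by
            intro q hq
            rcases List.mem_append.mp hq with hq | hq
            · exact h q (by simpa using hq)
            · simp at hq; simp [hq])
          refine ⟨?_, h2⟩
          rw [h1]
          simp

theorem pvRLE_flatten (battery : List Int) :
    (pvRLE battery).flatMap (fun p => List.replicate p.2.toNat p.1) = battery ∧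
      ∀ p ∈ pvRLE battery, 1 ≤ p.2 := by
  obtain ⟨h1, h2⟩ := pvRLE_aux battery [] (by simp)
  exact ⟨by simpa using h1, h2⟩

theorem pvFlatMap_filter (ex : Int) : ∀ (rs : List (Int × Int)),
    (rs.filter (fun p => p.1 ≠ ex)).flatMap (fun p => List.replicate p.2.toNat p.1)
      = (rs.flatMap (fun p => List.replicate p.2.toNat p.1)).filter (fun b => b ≠ ex) := by
  intro rs
  induction rs with
  | nil => rfl
  | cons p rs ih =>
      obtain ⟨v, k⟩ := p
      simp only [ne_eq, decide_not] at ih ⊢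
      by_cases hv : v = ex
      · simp [hv, List.flatMap_cons, List.filter_append, ih]
      · simp [hv, List.flatMap_cons, List.filter_append, ih]

theorem pvB_char (battery : List Int) (ex : Int) :
    pvMergedMax (pvRLE battery) ex
      = ((battery.filter (fun b => b ≠ ex)).foldl pvStep (none, 0, 0)).2.2 := by
  obtain ⟨hflat, hk⟩ := pvRLE_flatten battery
  show ((pvRLE battery).foldl (pvBStep ex) (none, 0, 0)).2.2 = _
  rw [pvB_scan ex (pvRLE battery) (none, 0, 0) (le_refl 0) hk, pvFlatMap_filter, hflat]

-- ===== VERDICT (by name: the statement is the Claim_ definition above) =====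
theorem solution_spec : Claim_equal_solution := by
  intro N battery _ hPre
  unfold Spec_solution
  rcases hPre with rfl | ⟨_, hhead⟩
  · rfl
  · show solution N battery = solution_alt N battery
    simp only [solution, solution_alt]
    refine PySem.List.foldl_congr_mem _ _ _ _ ?_
    intro acc ex hmem
    rw [pvA_char (battery.filter (fun b => b ≠ ex)) (hhead ex hmem), pvB_char]
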